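-- pv_equiv track=rewrite | github.com/f1r3k3rn/codeforces | contests/991/A.py | solve
-- ===== SOURCE A (Python) =====
-- def solve(n,m,strz):
--     sol = 0
--     s = 0
--     for i in strz:
--         if s + len(i) > m :
--             break
--         sol += 1
--         s += len(i)
--
--
--     return sol
-- ===== SOURCE B (Python) =====
-- def solve(n, m, strz):
--     # Build the prefix-sum table of lengths, then binary-search (bisect_right)
--     # for the number of cumulative lengths that stay within the budget m.
--     prefix = []
--     s = 0
--     for t in strz:
--         s += len(t)
--         prefix.append(s)
--     lo, hi = 0, len(prefix)
--     while lo < hi: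
--         mid = (lo + hi) // 2
--         if prefix[mid] <= m:
--             lo = mid + 1
--         else:
--             hi = mid
--     return lo
-- ===== Notes on version B (the rewrite author's own statement) =====
-- stated objective: alternative
-- what changed: B first materialises the prefix-sum table of string lengths and then finds the answer by binary search (bisect_right) over that monotone table, instead of A's single running-sum scan with an early break.
import Mathlib
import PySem

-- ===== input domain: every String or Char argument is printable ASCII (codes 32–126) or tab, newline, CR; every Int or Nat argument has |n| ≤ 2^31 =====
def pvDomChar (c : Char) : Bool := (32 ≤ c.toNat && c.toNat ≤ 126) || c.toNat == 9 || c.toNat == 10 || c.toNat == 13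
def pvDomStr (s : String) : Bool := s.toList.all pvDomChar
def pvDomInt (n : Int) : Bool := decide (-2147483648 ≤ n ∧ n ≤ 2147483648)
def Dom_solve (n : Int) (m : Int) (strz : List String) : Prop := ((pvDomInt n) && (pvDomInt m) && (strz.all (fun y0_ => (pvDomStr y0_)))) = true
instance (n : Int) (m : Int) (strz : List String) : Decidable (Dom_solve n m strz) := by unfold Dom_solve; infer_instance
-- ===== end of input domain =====

-- B builds a prefix-sum table and binary-searches it instead of A's running-sum scan with break; alternative decomposition, same result.

-- ===== PORT A =====
-- A's for-loop with break, as structural recursion over strz carrying (sol, s).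
def solveLoop (m : Int) : List String → Int → Int → Int
  | [], sol, _ => sol
  | i :: rest, sol, s =>
    if s + PySem.Str.len i > m then sol
    else solveLoop m rest (sol + 1) (s + PySem.Str.len i)

def solve (n : Int) (m : Int) (strz : List String) : Int :=
  solveLoop m strz 0 0

-- ===== PORT B =====
-- B's first loop: append the running sum after each string (prefix-sum table).
def prefixStep (st : List Int × Int) (t : String) : List Int × Int :=
  (st.1 ++ [st.2 + PySem.Str.len t], st.2 + PySem.Str.len t)

-- B's while-loop: binary search (bisect_right). prefix[mid] is always in range
-- when called as B calls it, so the .getD 0 default is never the result.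
def bsearch (xs : List Int) (m : Int) (lo hi : Nat) : Int :=
  if _h : lo < hi then
    let mid := (lo + hi) / 2
    if (PySem.List.pyGet? xs (mid : Int)).getD 0 ≤ m then bsearch xs m (mid + 1) hi
    else bsearch xs m lo mid
  else (lo : Int)
termination_by hi - lo
decreasing_by all_goals omega

def solve_alt (n : Int) (m : Int) (strz : List String) : Int :=
  let pfx := (strz.foldl prefixStep ([], 0)).1
  bsearch pfx m 0 pfx.length

-- ===== PRECONDITION & SPEC =====
def Spec_solve (n : Int) (m : Int) (strz : List String) (out : Int) : Prop := out = solve_alt n m strz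
instance (n : Int) (m : Int) (strz : List String) (out : Int) : Decidable (Spec_solve n m strz out) := by unfold Spec_solve; infer_instance

-- ===== CLAIM (what is proved, stated in full; the proofs are below) =====
def Claim_equal_solve : Prop := ∀ (n : Int) (m : Int) (strz : List String), Dom_solve n m strz → Spec_solve n m strz (solve n m strz)

-- ===== LEMMAS AND PROOFS =====

-- mathematical prefix-sum list starting from s
def pref (s : Int) : List String → List Int
  | [] => []
  | t :: r => (s + PySem.Str.len t) :: pref (s + PySem.Str.len t) r

def pLe (m : Int) : Int → Bool := fun x => decide (x ≤ m)

theorem foldl_prefixStep (strz : List String) : ∀ (acc : List Int) (s : Int),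
    (strz.foldl prefixStep (acc, s)).1 = acc ++ pref s strz := by
  induction strz with
  | nil => simp [pref]
  | cons t r ih =>
    intro acc s
    simp only [List.foldl_cons, pref]
    rw [show prefixStep (acc, s) t = (acc ++ [s + PySem.Str.len t], s + PySem.Str.len t) from rfl]
    rw [ih]
    simp

theorem solveLoop_eq_takeWhile (m : Int) (strz : List String) : ∀ (sol s : Int),
    solveLoop m strz sol s = sol + ((pref s strz).takeWhile (pLe m)).length := by
  induction strz with
  | nil => intro sol s; simp [solveLoop, pref]
  | cons t r ih =>
    intro sol s
    simp only [solveLoop, pref, PySem.Str.len_eq, String.length_toList]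
    by_cases h : s + (t.length : Int) ≤ m
    · rw [List.takeWhile_cons_of_pos (by simp [pLe]; omega), if_neg (by omega), ih]
      simp only [List.length_cons]
      push_cast
      ring
    · rw [List.takeWhile_cons_of_neg (by simp [pLe]; omega), if_pos (by omega)]
      simp

theorem pref_lb (strz : List String) : ∀ (s : Int) (x : Int), x ∈ pref s strz → s ≤ x := by
  induction strz with
  | nil => simp [pref]
  | cons t r ih =>
    intro s x hx
    have h0 : (0:Int) ≤ t.length := by positivity
    simp only [pref, List.mem_cons, PySem.Str.len_eq] at hx ⊢
    rcases hx with h | h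
    · omega
    · have := ih (s + t.length) x (by simpa using h); omega

theorem pref_mono (strz : List String) : ∀ (s : Int), (pref s strz).Pairwise (· ≤ ·) := by
  induction strz with
  | nil => intro s; simp [pref]
  | cons t r ih =>
    intro s
    simp only [pref, List.pairwise_cons]
    exact ⟨fun x hx => pref_lb r _ x hx, ih _⟩

-- below the takeWhile frontier every element satisfies the predicate
theorem tw_le (m : Int) : ∀ (xs : List Int) (i : Nat),
    i < (xs.takeWhile (pLe m)).length → pLe m (xs[i]?.getD 0) = true := by
  intro xs
  induction xs with
  | nil => simp
  | cons x r ih =>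
    intro i hi
    by_cases hx : pLe m x = true
    · rw [List.takeWhile_cons_of_pos hx] at hi
      cases i with
      | zero => simpa using hx
      | succ j => simpa using ih j (by simpa using hi)
    · rw [List.takeWhile_cons_of_neg hx] at hi
      simp at hi

-- at or past the frontier of a monotone list the predicate fails
theorem tw_gt (m : Int) : ∀ (xs : List Int), xs.Pairwise (· ≤ ·) → ∀ (i : Nat),
    (xs.takeWhile (pLe m)).length ≤ i → i < xs.length → pLe m (xs[i]?.getD 0) = false := by
  intro xs
  induction xs with
  | nil => simp
  | cons x r ih =>
    intro hs i hk hi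
    rw [List.pairwise_cons] at hs
    by_cases hx : pLe m x = true
    · rw [List.takeWhile_cons_of_pos hx] at hk
      cases i with
      | zero => simp at hk
      | succ j =>
        simpa using ih hs.2 j (by simpa using hk) (by simpa using hi)
    · cases i with
      | zero => simpa using hx
      | succ j =>
        have hj : j < r.length := by simpa using hi
        have hmem : r[j]?.getD 0 ∈ r := by
          rw [List.getElem?_eq_getElem hj]
          exact List.getElem_mem hj
        have hxle : x ≤ r[j]?.getD 0 := hs.1 _ hmem
        have hxm : ¬ x ≤ m := by simpa [pLe] using hx
        simp only [List.getElem?_cons_succ]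
        simp [pLe]
        omega

theorem bsearch_eq (m : Int) (xs : List Int) (hs : xs.Pairwise (· ≤ ·)) :
    ∀ (d lo hi : Nat), hi - lo ≤ d → lo ≤ (xs.takeWhile (pLe m)).length →
      (xs.takeWhile (pLe m)).length ≤ hi → hi ≤ xs.length →
      bsearch xs m lo hi = ((xs.takeWhile (pLe m)).length : Int) := by
  intro d
  induction d with
  | zero =>
    intro lo hi hd hlo hhi _
    rw [bsearch, dif_neg (by omega : ¬ lo < hi)]
    have : lo = (xs.takeWhile (pLe m)).length := by omega
    exact_mod_cast this
  | succ d ih =>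
    intro lo hi hd hlo hhi hlen
    rw [bsearch]
    by_cases h : lo < hi
    · rw [dif_pos h]
      dsimp only
      have hmidlt : (lo + hi) / 2 < hi := by omega
      have hmidge : lo ≤ (lo + hi) / 2 := by omega
      have hmlen : (lo + hi) / 2 < xs.length := by omega
      have hget : (PySem.List.pyGet? xs (((lo + hi) / 2 : Nat) : Int)).getD 0
          = xs[(lo + hi) / 2]?.getD 0 := by
        rw [PySem.List.pyGet?_natCast]
      rw [hget]
      by_cases hc : xs[(lo + hi) / 2]?.getD 0 ≤ m
      · rw [if_pos hc]
        have hmk : (lo + hi) / 2 < (xs.takeWhile (pLe m)).length := by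
          by_contra hnk
          have := tw_gt m xs hs ((lo + hi) / 2) (by omega) hmlen
          simp [pLe] at this
          omega
        exact ih ((lo + hi) / 2 + 1) hi (by omega) (by omega) hhi hlen
      · rw [if_neg hc]
        have hmk : (xs.takeWhile (pLe m)).length ≤ (lo + hi) / 2 := by
          by_contra hnk
          have := tw_le m xs ((lo + hi) / 2) (by omega)
          simp [pLe] at this
          omega
        exact ih lo ((lo + hi) / 2) (by omega) hlo (by omega) (by omega)
    · rw [dif_neg h]
      have : lo = (xs.takeWhile (pLe m)).length := by omega
      exact_mod_cast this

theorem solve_alt_eq (n m : Int) (strz : List String) :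
    solve_alt n m strz = ((pref 0 strz).takeWhile (pLe m)).length := by
  unfold solve_alt
  rw [show (strz.foldl prefixStep ([], 0)).1 = pref 0 strz from by
    simpa using foldl_prefixStep strz [] 0]
  exact bsearch_eq m (pref 0 strz) (pref_mono strz 0)
    (pref 0 strz).length 0 (pref 0 strz).length (by omega) (by omega)
    ((List.takeWhile_prefix _).length_le) (le_refl _)

-- ===== VERDICT (by name: the statement is the Claim_ definition above) =====
theorem solve_spec : Claim_equal_solve := by
  intro n m strz _
  unfold Spec_solve solve
  rw [solveLoop_eq_takeWhile, solve_alt_eq]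
  simp
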